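-- pv_equiv track=rewrite | github.com/BenC6116/Software-Project | analysis.py | construct_cluster_array
-- ===== SOURCE A (Python) =====
-- def construct_cluster_array(clusters, data_points):
--     cluster_arr = [0] * len(data_points)
--     for i, data_point in enumerate(data_points):
--         break_out = False
--         for j, cluster in enumerate(clusters):
--             for vector in cluster:
--                 if data_point == vector:
--                     cluster_arr[i] = j
--                     break_out = True
--                     break
--             if break_out:
--                 break
--     return cluster_arr
-- ===== SOURCE B (Python) =====
-- def construct_cluster_array(clusters, data_points):
--     first = {}
--     for j, cluster in enumerate(clusters):
--         for vector in cluster: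
--             key = tuple(vector)
--             if key not in first:
--                 first[key] = j
--     return [first.get(tuple(p), 0) for p in data_points]
-- ===== Notes on version B (the rewrite author's own statement) =====
-- stated objective: faster
-- what changed: Replaces the per-point nested scan over all clusters by a single pass that builds a first-cluster-index dictionary keyed by vector, then maps each data point through one dictionary lookup (default 0).
import Mathlib
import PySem

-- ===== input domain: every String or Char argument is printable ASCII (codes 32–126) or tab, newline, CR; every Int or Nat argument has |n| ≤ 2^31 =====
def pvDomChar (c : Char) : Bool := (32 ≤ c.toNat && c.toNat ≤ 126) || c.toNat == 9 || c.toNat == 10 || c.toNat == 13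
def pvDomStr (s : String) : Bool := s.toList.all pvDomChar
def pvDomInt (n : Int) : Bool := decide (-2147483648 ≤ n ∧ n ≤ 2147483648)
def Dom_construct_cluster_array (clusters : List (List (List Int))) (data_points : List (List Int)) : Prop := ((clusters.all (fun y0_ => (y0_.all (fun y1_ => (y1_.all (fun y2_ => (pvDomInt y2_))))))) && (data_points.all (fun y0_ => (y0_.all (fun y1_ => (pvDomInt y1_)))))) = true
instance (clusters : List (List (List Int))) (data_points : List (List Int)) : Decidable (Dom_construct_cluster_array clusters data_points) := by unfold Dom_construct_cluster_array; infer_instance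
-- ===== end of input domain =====

-- B replaces A's per-point nested scan over all clusters with a dictionary mapping each
-- vector to its first cluster index, built once, then one lookup per point (objective: faster).

-- ===== PORT A =====
-- A's innermost 'for vector in cluster: if data_point == vector: … break'
def pvScanVectors (cluster : List (List Int)) (p : List Int) : Bool :=
  match cluster with
  | [] => false
  | v :: vs => if p = v then true else pvScanVectors vs p

-- A's 'for j, cluster in enumerate(clusters): … if break_out: break'
def pvScanClusters (cls : List (Int × List (List Int))) (p : List Int) : Option Int :=
  match cls with
  | [] => none
  | (j, c) :: rest => if pvScanVectors c p then some j else pvScanClusters rest p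

def construct_cluster_array (clusters : List (List (List Int))) (data_points : List (List Int)) : List Int :=
  (PySem.List.enumerate data_points).foldl
    (fun arr ip =>
      match pvScanClusters (PySem.List.enumerate clusters) ip.2 with
      | some j => arr.set ip.1.toNat j
      | none => arr)
    (List.replicate data_points.length 0)

-- ===== PORT B =====
def construct_cluster_array_alt (clusters : List (List (List Int))) (data_points : List (List Int)) : List Int :=
  let first : PySem.Dict (List Int) Int :=
    (PySem.List.enumerate clusters).foldl
      (fun d jc => jc.2.foldl (fun d v => if d.contains v then d else d.insert v jc.1) d)
      PySem.Dict.empty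
  data_points.map (fun p => first.getD p 0)

-- ===== PRECONDITION & SPEC =====
def Spec_construct_cluster_array (clusters : List (List (List Int))) (data_points : List (List Int)) (out : List Int) : Prop := out = construct_cluster_array_alt clusters data_points
instance (clusters : List (List (List Int))) (data_points : List (List Int)) (out : List Int) : Decidable (Spec_construct_cluster_array clusters data_points out) := by unfold Spec_construct_cluster_array; infer_instance

-- ===== CLAIM (what is proved, stated in full; the proofs are below) =====
def Claim_equal_construct_cluster_array : Prop := ∀ (clusters : List (List (List Int))) (data_points : List (List Int)), Dom_construct_cluster_array clusters data_points → Spec_construct_cluster_array clusters data_points (construct_cluster_array clusters data_points)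

-- ===== LEMMAS AND PROOFS =====

-- One cluster's inner insert-if-absent loop: earlier dict entries win, otherwise the scan decides.
theorem pv_inner (c : List (List Int)) (j : Int) (p : List Int) :
    ∀ d : PySem.Dict (List Int) Int,
      (c.foldl (fun d v => if d.contains v then d else d.insert v j) d).get? p
        = (d.get? p).or (if pvScanVectors c p then some j else none) := by
  induction c with
  | nil => intro d; simp [pvScanVectors]
  | cons v vs ih =>
    intro d
    simp only [List.foldl_cons, ih, pvScanVectors]
    by_cases hpv : p = v
    · subst hpv
      by_cases hc : d.contains p
      · have hs : (d.get? p).isSome := by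
          rw [← PySem.Dict.contains_eq_isSome_get?]; exact hc
        obtain ⟨w, hw⟩ := Option.isSome_iff_exists.mp hs
        simp [hc, hw]
      · have hn : d.get? p = none := by
          rcases h : d.get? p with _ | w
          · rfl
          · exfalso; apply hc; rw [PySem.Dict.contains_eq_isSome_get?, h]; rfl
        simp [hc, hn, PySem.Dict.get?_insert_self]
    · by_cases hc : d.contains v
      · simp [hc, hpv]
      · simp [hc, hpv, PySem.Dict.get?_insert_of_ne d j hpv]

-- The whole dictionary-building loop computes A's first-matching-cluster scan.
theorem pv_outer (p : List Int) :
    ∀ (cls : List (Int × List (List Int))) (d : PySem.Dict (List Int) Int),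
      ((cls.foldl (fun d jc => jc.2.foldl (fun d v => if d.contains v then d else d.insert v jc.1) d) d).get? p)
        = (d.get? p).or (pvScanClusters cls p) := by
  intro cls
  induction cls with
  | nil => intro d; simp [pvScanClusters]
  | cons jc rest ih =>
    intro d
    obtain ⟨j, c⟩ := jc
    simp only [List.foldl_cons, ih, pv_inner, pvScanClusters]
    by_cases h : pvScanVectors c p <;> simp [h]

theorem pv_set_mid (j : Int) : ∀ (l1 l2 : List Int) (a : Int),
    (l1 ++ a :: l2).set l1.length j = l1 ++ j :: l2 := by
  intro l1
  induction l1 with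
  | nil => intro l2 a; simp
  | cons x xs ih => intro l2 a; simp [ih]

-- A's array loop, with the already-written prefix made explicit.
theorem pv_arr (clusters : List (List (List Int))) :
    ∀ (pts : List (List Int)) (pre : List Int),
      (PySem.List.enumerate pts (pre.length : Int)).foldl
        (fun arr ip =>
          match pvScanClusters (PySem.List.enumerate clusters) ip.2 with
          | some j => arr.set ip.1.toNat j
          | none => arr)
        (pre ++ List.replicate pts.length 0)
      = pre ++ pts.map (fun p => (pvScanClusters (PySem.List.enumerate clusters) p).getD 0) := by
  intro pts
  induction pts with
  | nil => intro pre; simp [PySem.List.enumerate]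
  | cons p rest ih =>
    intro pre
    rw [PySem.List.enumerate_cons]
    simp only [List.foldl_cons, List.length_cons, List.replicate_succ, List.map_cons]
    rcases h : pvScanClusters (PySem.List.enumerate clusters) p with _ | j
    · have := ih (pre ++ [(0 : Int)])
      simp only [List.length_append, List.length_singleton, List.append_assoc,
        List.singleton_append, Nat.cast_add, Nat.cast_one] at this
      rw [this]
      simp [Option.getD]
    · have hset : (pre ++ (0 : Int) :: List.replicate rest.length 0).set
          ((pre.length : Int)).toNat j = pre ++ j :: List.replicate rest.length 0 := by
        rw [Int.toNat_natCast, pv_set_mid]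
      simp only [hset]
      have := ih (pre ++ [j])
      simp only [List.length_append, List.length_singleton, List.append_assoc,
        List.singleton_append, Nat.cast_add, Nat.cast_one] at this
      rw [this]
      simp [Option.getD]

-- ===== VERDICT (by name: the statement is the Claim_ definition above) =====
theorem construct_cluster_array_spec : Claim_equal_construct_cluster_array := by
  intro clusters data_points _
  unfold Spec_construct_cluster_array construct_cluster_array construct_cluster_array_alt
  have harr := pv_arr clusters data_points []
  simp only [List.length_nil, Nat.cast_zero, List.nil_append] at harr
  rw [harr]
  apply List.map_congr_left
  intro p _
  rw [PySem.Dict.getD_eq_get?_getD, pv_outer, PySem.Dict.get?_empty, Option.none_or]
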